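-- pv_equiv track=rewrite | github.com/xuehaoweng/rag_brainstorm | app/indexing/chunker.py | _paragraph_blocks
-- ===== SOURCE A (Python) =====
-- def _paragraph_blocks(lines: list[str], start_line: int) -> list[tuple[str, int, int]]:
--     blocks: list[tuple[str, int, int]] = []
--     current: list[str] = []
--     current_start = start_line
--     in_code_fence = False
--
--     for offset, line in enumerate(lines):
--         line_number = start_line + offset
--         stripped = line.strip()
--         fence_start = stripped.startswith("```") or stripped.startswith("~~~")
--
--         if not current:
--             current_start = line_number
--
--         if fence_start:
--             in_code_fence = not in_code_fence
--
--         if not in_code_fence and not stripped: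
--             if current:
--                 blocks.append(("\n".join(current), current_start, line_number - 1))
--                 current = []
--             continue
--
--         current.append(line)
--
--     if current:
--         blocks.append(("\n".join(current), current_start, start_line + len(lines) - 1))
--
--     return blocks
-- ===== SOURCE B (Python) =====
-- def _paragraph_blocks(lines: list[str], start_line: int) -> list[tuple[str, int, int]]:
--     # Pass 1: tag each line True iff it belongs to a block (inside a fence after
--     # toggling, or non-blank).
--     tags = []
--     fence = False
--     for line in lines:
--         s = line.strip()
--         if s.startswith("```") or s.startswith("~~~"):
--             fence = not fence
--         tags.append(fence or bool(s))
--     # Pass 2: emit each maximal run of True-tagged lines as one block.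
--     blocks = []
--     n = len(lines)
--     i = 0
--     while i < n:
--         if not tags[i]:
--             i += 1
--             continue
--         j = i
--         while j < n and tags[j]:
--             j += 1
--         blocks.append(("\n".join(lines[i:j]), start_line + i, start_line + j - 1))
--         i = j
--     return blocks
-- ===== Notes on version B (the rewrite author's own statement) =====
-- stated objective: alternative
-- what changed: Replaces A's single stateful loop (blocks/current/current_start/fence juggled together) by two passes: a first scan tags each line in-block-or-not via the fence toggle, then a second pass emits each maximal run of tagged lines as one block with arithmetic line numbers.
import Mathlib
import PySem

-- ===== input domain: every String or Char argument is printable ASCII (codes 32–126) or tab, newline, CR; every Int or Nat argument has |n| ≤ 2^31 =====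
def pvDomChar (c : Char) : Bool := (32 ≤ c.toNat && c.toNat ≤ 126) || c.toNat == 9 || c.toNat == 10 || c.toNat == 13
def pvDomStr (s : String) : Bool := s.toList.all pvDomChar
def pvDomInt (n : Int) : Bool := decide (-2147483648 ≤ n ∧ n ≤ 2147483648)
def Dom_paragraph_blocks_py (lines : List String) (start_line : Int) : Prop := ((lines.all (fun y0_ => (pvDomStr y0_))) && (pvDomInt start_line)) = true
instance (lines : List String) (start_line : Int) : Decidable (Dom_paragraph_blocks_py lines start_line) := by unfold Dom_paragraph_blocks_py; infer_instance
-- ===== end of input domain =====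

-- B replaces A's single stateful loop by two passes: tag each line in-block/not via the
-- fence toggle, then emit maximal runs of tagged lines with arithmetic line numbers
-- (alternative decomposition, same cost).

-- ===== PORT A =====
-- the for-loop of A, state carried verbatim: blocks, current, current_start, in_code_fence,
-- plus the running line_number (= start_line + offset)
def pvLoopA (lines : List String) (blocks : List (String × Int × Int)) (current : List String)
    (current_start : Int) (fence : Bool) (lineno : Int) : List (String × Int × Int) :=
  match lines with
  | [] =>
      if current.isEmpty then blocks
      else blocks ++ [(PySem.Str.join "\n" current, current_start, lineno - 1)]
  | line :: rest =>
      let stripped := PySem.Str.strip line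
      let fence_start := PySem.Str.startswith stripped "```" || PySem.Str.startswith stripped "~~~"
      let cs := if current.isEmpty then lineno else current_start
      let f := if fence_start then !fence else fence
      if !f && stripped == "" then
        if current.isEmpty then
          pvLoopA rest blocks [] cs f (lineno + 1)
        else
          pvLoopA rest (blocks ++ [(PySem.Str.join "\n" current, cs, lineno - 1)]) [] cs f (lineno + 1)
      else
        pvLoopA rest blocks (current ++ [line]) cs f (lineno + 1)

def paragraph_blocks_py (lines : List String) (start_line : Int) : List (String × Int × Int) :=
  pvLoopA lines [] [] start_line false start_line

-- ===== PORT B =====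
-- pass 1 of B: the in-block tag of every line
def pvTagsB : List String → Bool → List Bool
  | [], _ => []
  | line :: rest, fence =>
      let s := PySem.Str.strip line
      let f := if PySem.Str.startswith s "```" || PySem.Str.startswith s "~~~" then !fence else fence
      (f || !(s == "")) :: pvTagsB rest f

-- pass 2 of B: emit each maximal run of tagged lines as one block
def pvGroupB : List (String × Bool) → Int → List (String × Int × Int)
  | [], _ => []
  | (l, t) :: rest, pos =>
      if t then
        let run := (l, t) :: rest.takeWhile (·.2)
        (PySem.Str.join "\n" (run.map Prod.fst), pos, pos + run.length - 1) ::
          pvGroupB (rest.dropWhile (·.2)) (pos + run.length)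
      else pvGroupB rest (pos + 1)
termination_by l _ => l.length
decreasing_by
  · exact Nat.lt_succ_of_le (List.length_dropWhile_le _ _)
  · exact Nat.lt_succ_self _

def paragraph_blocks_py_alt (lines : List String) (start_line : Int) : List (String × Int × Int) :=
  pvGroupB (lines.zip (pvTagsB lines false)) start_line

-- ===== PRECONDITION & SPEC =====
def Spec_paragraph_blocks_py (lines : List String) (start_line : Int) (out : List (String × Int × Int)) : Prop := out = paragraph_blocks_py_alt lines start_line
instance (lines : List String) (start_line : Int) (out : List (String × Int × Int)) : Decidable (Spec_paragraph_blocks_py lines start_line out) := by unfold Spec_paragraph_blocks_py; infer_instance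

-- ===== CLAIM (what is proved, stated in full; the proofs are below) =====
def Claim_equal_paragraph_blocks_py : Prop := ∀ (lines : List String) (start_line : Int), Dom_paragraph_blocks_py lines start_line → Spec_paragraph_blocks_py lines start_line (paragraph_blocks_py lines start_line)

-- ===== LEMMAS AND PROOFS =====

-- A's loop state (pending current run with its start) expressed as a grouping continuation
def pvGroupCont (current : List String) (cs : Int) : List (String × Bool) → Int → List (String × Int × Int)
  | [], pos => if current.isEmpty then [] else [(PySem.Str.join "\n" current, cs, pos - 1)]
  | (l, t) :: rest, pos =>
      if t then pvGroupCont (current ++ [l]) (if current.isEmpty then pos else cs) rest (pos + 1)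
      else (if current.isEmpty then [] else [(PySem.Str.join "\n" current, cs, pos - 1)]) ++
        pvGroupCont [] cs rest (pos + 1)

theorem pvGroupCont_eq_groupB (l : List (String × Bool)) : ∀ (current : List String) (cs pos : Int),
    pvGroupCont current cs l pos =
      if current.isEmpty then pvGroupB l pos
      else (PySem.Str.join "\n" (current ++ (l.takeWhile (·.2)).map Prod.fst), cs,
              pos + (l.takeWhile (·.2)).length - 1) ::
            pvGroupB (l.dropWhile (·.2)) (pos + (l.takeWhile (·.2)).length) := by
  induction l with
  | nil =>
      intro current cs pos
      by_cases h : current.isEmpty <;> simp [pvGroupCont, pvGroupB, h]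
  | cons p rest ih =>
      intro current cs pos
      obtain ⟨a, t⟩ := p
      cases t with
      | false =>
          by_cases h : current.isEmpty <;> simp [pvGroupCont, pvGroupB, h, ih]
      | true =>
          by_cases h : current.isEmpty
          · have h' : current = [] := List.isEmpty_iff.mp h
            subst h'
            simp only [pvGroupCont, ite_true, List.isEmpty_nil, ih]
            simp [pvGroupB]
            constructor
            · omega
            · ring_nf
          · have h2 : (current ++ [a]).isEmpty = false := by simp
            simp only [pvGroupCont, ite_true, h, ih, h2, Bool.false_eq_true, ite_false]
            simp
            constructor
            · omega
            · ring_nf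

theorem pvGroupCont_nil_cs (l : List (String × Bool)) (cs cs' pos : Int) :
    pvGroupCont [] cs l pos = pvGroupCont [] cs' l pos := by
  rw [pvGroupCont_eq_groupB, pvGroupCont_eq_groupB]
  simp

theorem pvLoopA_eq_groupCont (lines : List String) :
    ∀ (blocks : List (String × Int × Int)) (current : List String) (cs : Int) (fence : Bool) (lineno : Int),
    pvLoopA lines blocks current cs fence lineno =
      blocks ++ pvGroupCont current cs (lines.zip (pvTagsB lines fence)) lineno := by
  induction lines with
  | nil =>
      intro blocks current cs fence lineno
      by_cases h : current.isEmpty <;> simp [pvLoopA, pvGroupCont, h]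
  | cons line rest ih =>
      intro blocks current cs fence lineno
      simp only [pvLoopA, pvTagsB, List.zip_cons_cons]
      generalize PySem.Str.strip line = s
      generalize (PySem.Str.startswith s "```" || PySem.Str.startswith s "~~~") = fs
      generalize (if fs = true then !fence else fence) = f
      by_cases hb : (s == "") = true
      · cases f with
        | false =>
            by_cases h : current.isEmpty
            · simp only [hb, Bool.not_false, Bool.true_and, ite_true, h, ih, pvGroupCont,
                Bool.false_or, Bool.not_true, Bool.false_eq_true, ite_false, List.nil_append]
              exact congrArg (blocks ++ ·) (pvGroupCont_nil_cs _ _ _ _)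
            · simp only [hb, Bool.not_false, Bool.true_and, ite_true, h, ih, pvGroupCont,
                Bool.false_or, Bool.not_true, Bool.false_eq_true, ite_false]
              simp [List.append_assoc]
        | true =>
            simp only [hb, Bool.not_true, Bool.false_and, Bool.false_eq_true, ite_false, ih,
              pvGroupCont, Bool.true_or, ite_true]
      · have hb' : (s == "") = false := by simpa using hb
        simp only [hb', Bool.and_false, Bool.false_eq_true, ite_false, ih, pvGroupCont,
          Bool.not_false, Bool.or_true, ite_true]

-- ===== VERDICT (by name: the statement is the Claim_ definition above) =====
theorem paragraph_blocks_py_spec : Claim_equal_paragraph_blocks_py := by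
  intro lines start_line _
  unfold Spec_paragraph_blocks_py paragraph_blocks_py paragraph_blocks_py_alt
  rw [pvLoopA_eq_groupCont, pvGroupCont_eq_groupB]
  simp
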